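-- pv_equiv track=rewrite | github.com/EugenHotaj/experimental | cltetris/tetris.py | add_to_game_board
-- ===== SOURCE A (Python) =====
-- import copy
--
-- def add_to_game_board(game_board, tetromino, idx, x, y):
--     """Adds the tetromino to the board once it is no longer in play."""
--     if not tetromino:
--         return game_board
--     new_board = copy.deepcopy(game_board)
--     variant = tetromino[idx]
--     original_x = x
--     for char in variant:
--         if char == '\n':
--             y += 1
--             x = original_x
--             continue
--         if char == ' ':
--             pass # Do nothing so we don't draw on existing pieces.
--         if char == 'x':
--             new_board[y][x] = 'x'
--         x += 1
--     return new_board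
-- ===== SOURCE B (Python) =====
-- import copy
--
--
-- def add_to_game_board(game_board, tetromino, idx, x, y):
--     """Adds the tetromino to the board once it is no longer in play."""
--     if not tetromino:
--         return game_board
--     new_board = copy.deepcopy(game_board)
--     for dy, line in enumerate(tetromino[idx].split('\n')):
--         for dx, ch in enumerate(line):
--             if ch == 'x':
--                 new_board[y + dy][x + dx] = 'x'
--     return new_board
-- ===== Notes on version B (the rewrite author's own statement) =====
-- stated objective: simpler
-- what changed: The flat character scan with manual x/y/original_x bookkeeping and an explicit newline branch is replaced by splitting the variant into rows and stamping via two nested enumerate loops over rows and columns.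
import Mathlib
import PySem

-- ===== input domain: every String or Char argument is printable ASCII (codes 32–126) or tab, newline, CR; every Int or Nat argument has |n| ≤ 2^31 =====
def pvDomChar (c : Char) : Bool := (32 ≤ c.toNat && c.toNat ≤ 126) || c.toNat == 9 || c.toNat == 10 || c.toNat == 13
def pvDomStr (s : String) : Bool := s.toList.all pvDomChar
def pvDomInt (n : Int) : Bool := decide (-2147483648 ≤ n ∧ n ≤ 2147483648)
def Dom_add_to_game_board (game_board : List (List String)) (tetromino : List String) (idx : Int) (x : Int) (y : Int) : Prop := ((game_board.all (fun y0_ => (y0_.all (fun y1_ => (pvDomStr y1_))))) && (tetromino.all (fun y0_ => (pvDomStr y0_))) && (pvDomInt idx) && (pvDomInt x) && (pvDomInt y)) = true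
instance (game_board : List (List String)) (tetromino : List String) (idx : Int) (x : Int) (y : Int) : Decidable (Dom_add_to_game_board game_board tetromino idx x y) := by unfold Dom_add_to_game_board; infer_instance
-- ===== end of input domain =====

-- B replaces A's flat character scan (manual x/y/original_x bookkeeping with a newline branch)
-- by splitting the variant into rows and stamping via nested row/column enumerate loops (simpler).

-- ===== PORT A =====
-- the statement new_board[y][x] = 'x'; total form pySetD/pyGetD is exact under Pre_ (both indices in range)
def aStamp (b : List (List String)) (yy xx : Int) : List (List String) :=
  PySem.List.pySetD b yy (PySem.List.pySetD (PySem.List.pyGetD b yy []) xx "x")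

-- the for-loop over the variant's characters; state = (new_board, x, y); ox = original_x
-- (the Python's `if char == ' ': pass` branch does nothing and is kept as this comment)
def aLoop (ox : Int) : List Char → (List (List String)) × Int × Int → (List (List String)) × Int × Int
  | [], st => st
  | c :: cs, (b, xx, yy) =>
    if c = '\n' then aLoop ox cs (b, ox, yy + 1)
    else aLoop ox cs ((if c = 'x' then aStamp b yy xx else b), xx + 1, yy)

def add_to_game_board (game_board : List (List String)) (tetromino : List String) (idx : Int) (x : Int) (y : Int) : List (List String) :=
  if tetromino = [] then game_board
  else (aLoop x (PySem.List.pyGetD tetromino idx "").toList (game_board, x, y)).1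

-- ===== PORT B =====
def add_to_game_board_alt (game_board : List (List String)) (tetromino : List String) (idx : Int) (x : Int) (y : Int) : List (List String) :=
  if tetromino = [] then game_board
  else
    let rows := PySem.Chars.splitOn (PySem.List.pyGetD tetromino idx "").toList ['\n']
    (PySem.List.enumerate rows 0).foldl
      (fun b p =>
        (PySem.List.enumerate p.2 0).foldl
          (fun b2 q =>
            if q.2 = 'x' then
              PySem.List.pySetD b2 (y + p.1) (PySem.List.pySetD (PySem.List.pyGetD b2 (y + p.1) []) (x + q.1) "x")
            else b2) b) game_board
-- ===== PRECONDITION & SPEC =====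
-- Pre_ excludes exactly the inputs where the Python raises IndexError: a nonempty tetromino
-- with idx out of Python range, or some stamped cell (y+row, x+col) out of Python range.
def Pre_add_to_game_board (game_board : List (List String)) (tetromino : List String) (idx : Int) (x : Int) (y : Int) : Prop :=
  tetromino = [] ∨
    (PySem.Raise.InRange tetromino.length idx ∧
      ∀ p ∈ PySem.List.enumerate (PySem.Chars.splitOn (PySem.List.pyGetD tetromino idx "").toList ['\n']) 0,
        ∀ q ∈ PySem.List.enumerate p.2 0, q.2 = 'x' →
          PySem.Raise.InRange game_board.length (y + p.1) ∧
          PySem.Raise.InRange (PySem.List.pyGetD game_board (y + p.1) []).length (x + q.1))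
instance (game_board : List (List String)) (tetromino : List String) (idx : Int) (x : Int) (y : Int) : Decidable (Pre_add_to_game_board game_board tetromino idx x y) := by unfold Pre_add_to_game_board; infer_instance

def pvWitness_add_to_game_board : List (List String) × List String × Int × Int × Int :=
  ([[".", "."], [".", "."]], ["x \nxx"], 0, 0, 0)

def Spec_add_to_game_board (game_board : List (List String)) (tetromino : List String) (idx : Int) (x : Int) (y : Int) (out : List (List String)) : Prop := out = add_to_game_board_alt game_board tetromino idx x y
instance (game_board : List (List String)) (tetromino : List String) (idx : Int) (x : Int) (y : Int) (out : List (List String)) : Decidable (Spec_add_to_game_board game_board tetromino idx x y out) := by unfold Spec_add_to_game_board; infer_instance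

-- ===== CLAIM (what is proved, stated in full; the proofs are below) =====
def Claim_equal_add_to_game_board : Prop := ∀ (game_board : List (List String)) (tetromino : List String) (idx : Int) (x : Int) (y : Int), Dom_add_to_game_board game_board tetromino idx x y → Pre_add_to_game_board game_board tetromino idx x y → Spec_add_to_game_board game_board tetromino idx x y (add_to_game_board game_board tetromino idx x y)

-- ===== LEMMAS AND PROOFS =====

-- proof-only structural version of str.split('\n')
def splitNL : List Char → List (List Char)
  | [] => [[]]
  | c :: cs =>
    if c = '\n' then [] :: splitNL cs
    else
      match splitNL cs with
      | [] => [[c]]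
      | r :: rs => (c :: r) :: rs

-- proof-only joiner, inverse of splitNL
def joinNL : List (List Char) → List Char
  | [] => []
  | [r] => r
  | r :: rs => r ++ '\n' :: joinNL rs

theorem splitNL_ne_nil (cs : List Char) : splitNL cs ≠ [] := by
  induction cs with
  | nil => simp [splitNL]
  | cons c cs ih =>
    simp only [splitNL]
    split_ifs
    · simp
    · cases h : splitNL cs <;> simp

theorem go_spec (fuel : Nat) : ∀ (l cur : List Char) (acc : List (List Char)), l.length < fuel →
    PySem.Chars.splitOn.go ['\n'] fuel l cur acc
      = acc.reverse ++ (cur.reverse ++ (splitNL l).headD []) :: (splitNL l).tail := by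
  induction fuel with
  | zero => intro l cur acc h; omega
  | succ f ih =>
    intro l cur acc h
    cases l with
    | nil => simp [PySem.Chars.splitOn.go, splitNL]
    | cons c rest =>
      by_cases hc : c = '\n'
      · subst hc
        rw [PySem.Chars.splitOn.go]
        simp only [List.isPrefixOf, List.length_cons] at *
        rw [if_pos (by simp)]
        have hdrop : List.drop (List.length ([] : List Char) + 1) ('\n' :: rest) = rest := rfl
        rw [hdrop, ih rest [] (cur.reverse :: acc) (by omega)]
        have hne := splitNL_ne_nil rest
        cases hsp : splitNL rest with
        | nil => exact absurd hsp hne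
        | cons r rs => simp [splitNL, hsp]
      · rw [PySem.Chars.splitOn.go]
        rw [if_neg (by simp [List.isPrefixOf]; intro h'; exact hc h'.symm)]
        rw [ih rest (c :: cur) acc (by simp at h ⊢; omega)]
        have hne := splitNL_ne_nil rest
        cases hsp : splitNL rest with
        | nil => exact absurd hsp hne
        | cons r rs => simp [splitNL, hsp, hc]

theorem splitOn_eq_splitNL (cs : List Char) :
    PySem.Chars.splitOn cs ['\n'] = splitNL cs := by
  have h := go_spec (cs.length + 1) cs [] [] (by omega)
  have hne := splitNL_ne_nil cs
  cases hsp : splitNL cs with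
  | nil => exact absurd hsp hne
  | cons r rs =>
    rw [PySem.Chars.splitOn, h, hsp]
    simp

theorem joinNL_splitNL (cs : List Char) : joinNL (splitNL cs) = cs := by
  induction cs with
  | nil => simp [splitNL, joinNL]
  | cons c cs ih =>
    simp only [splitNL]
    split_ifs with hc
    · subst hc
      cases h : splitNL cs with
      | nil => exact absurd h (splitNL_ne_nil cs)
      | cons r rs => rw [h] at ih; simpa [joinNL] using ih
    · cases h : splitNL cs with
      | nil => exact absurd h (splitNL_ne_nil cs)
      | cons r rs =>
        rw [h] at ih
        cases rs with
        | nil => simpa [joinNL] using ih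
        | cons r2 rs2 => simpa [joinNL] using ih

theorem no_nl_splitNL (cs : List Char) : ∀ r ∈ splitNL cs, '\n' ∉ r := by
  induction cs with
  | nil => simp [splitNL]
  | cons c cs ih =>
    simp only [splitNL]
    split_ifs with hc
    · intro r hr
      rcases List.mem_cons.mp hr with hr | hr
      · simp [hr]
      · exact ih r hr
    · cases h : splitNL cs with
      | nil => exact absurd h (splitNL_ne_nil cs)
      | cons r0 rs =>
        rw [h] at ih
        intro r hr
        rcases List.mem_cons.mp hr with hr | hr
        · subst hr
          intro hmem
          rcases List.mem_cons.mp hmem with hmem | hmem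
          · exact hc hmem.symm
          · exact ih r0 (List.mem_cons_self) hmem
        · exact ih r (List.mem_cons_of_mem _ hr)

theorem aLoop_append (ox : Int) (s t : List Char) (st : (List (List String)) × Int × Int) :
    aLoop ox (s ++ t) st = aLoop ox t (aLoop ox s st) := by
  induction s generalizing st with
  | nil => simp [aLoop]
  | cons c cs ih =>
    obtain ⟨b, xx, yy⟩ := st
    simp only [List.cons_append, aLoop]
    split_ifs <;> exact ih _

theorem aLoop_row (x0 : Int) (r : List Char) (hr : '\n' ∉ r) :
    ∀ (b : List (List String)) (yy s : Int),
    aLoop x0 r (b, x0 + s, yy)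
      = ((PySem.List.enumerate r s).foldl
           (fun b2 q => if q.2 = 'x' then aStamp b2 yy (x0 + q.1) else b2) b,
         x0 + s + r.length, yy) := by
  induction r with
  | nil => intro b yy s; simp [aLoop, PySem.List.enumerate]
  | cons c cs ih =>
    intro b yy s
    have hc : c ≠ '\n' := fun h => hr (by simp [h])
    have hcs : '\n' ∉ cs := fun h => hr (by simp [h])
    simp only [aLoop, if_neg hc]
    have : x0 + s + 1 = x0 + (s + 1) := by ring
    rw [this, ih hcs _ yy (s + 1)]
    rw [PySem.List.enumerate_cons]
    simp only [List.foldl_cons, List.length_cons, Prod.mk.injEq]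
    exact ⟨trivial, by push_cast; ring, trivial⟩

theorem aLoop_rows (x0 : Int) :
    ∀ (rows : List (List Char)), (∀ r ∈ rows, '\n' ∉ r) →
    ∀ (b : List (List String)) (s yb : Int),
    (aLoop x0 (joinNL rows) (b, x0, yb + s)).1
      = (PySem.List.enumerate rows s).foldl
          (fun b p =>
            (PySem.List.enumerate p.2 0).foldl
              (fun b2 q => if q.2 = 'x' then aStamp b2 (yb + p.1) (x0 + q.1) else b2) b) b := by
  intro rows
  induction rows with
  | nil => intro _ b s yb; simp [joinNL, aLoop, PySem.List.enumerate]
  | cons r rest ih =>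
    intro h b s yb
    have hr : '\n' ∉ r := h r (by simp)
    have hrest : ∀ r' ∈ rest, '\n' ∉ r' := fun r' hr' => h r' (by simp [hr'])
    rw [PySem.List.enumerate_cons]
    simp only [List.foldl_cons]
    have hrow := aLoop_row x0 r hr b (yb + s) 0
    rw [show x0 + (0 : Int) = x0 from by ring] at hrow
    cases rest with
    | nil =>
      have hj : joinNL [r] = r := rfl
      rw [hj, hrow]
      simp [PySem.List.enumerate]
    | cons r2 rs =>
      have hjoin : joinNL (r :: r2 :: rs) = r ++ '\n' :: joinNL (r2 :: rs) := rfl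
      rw [hjoin, aLoop_append, hrow]
      simp only [aLoop]
      have hy : yb + s + 1 = yb + (s + 1) := by ring
      rw [hy]
      simp only [if_true]
      rw [ih hrest _ (s + 1) yb]

theorem ports_eq (game_board : List (List String)) (tetromino : List String) (idx : Int) (x : Int) (y : Int) :
    add_to_game_board game_board tetromino idx x y = add_to_game_board_alt game_board tetromino idx x y := by
  unfold add_to_game_board add_to_game_board_alt
  by_cases h : tetromino = []
  · simp [h]
  · rw [if_neg h, if_neg h]
    set cs := (PySem.List.pyGetD tetromino idx "").toList with hcs
    rw [splitOn_eq_splitNL]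
    have hy : y = y + 0 := by ring
    conv_lhs => rw [← joinNL_splitNL cs, hy]
    rw [aLoop_rows x (splitNL cs) (no_nl_splitNL cs) game_board 0 y]
    simp only [aStamp]

-- ===== VERDICT (by name: the statement is the Claim_ definition above) =====
theorem add_to_game_board_spec : Claim_equal_add_to_game_board := by
  intro game_board tetromino idx x y _ _
  unfold Spec_add_to_game_board
  exact ports_eq game_board tetromino idx x y
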